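-- pv_equiv track=rewrite | github.com/Enailis/Advent-of-Code-2022 | Day15/part1.py | part1
-- ===== SOURCE A (Python) =====
-- def get_distance(b, s):
--     return abs(b[0] - s[0]) + abs(b[1] - s[1])
--
-- def part1(inputs):
--     free = []
--     target_y = 2000000
--
--     for sensor, beacon in inputs:
--         distance = get_distance(sensor, beacon)
--
--         dy = abs(sensor[1] - target_y)
--         if dy <= distance:
--             dx = distance - dy
--             free.append((sensor[0] - dx, sensor[0] + dx))
--
--     free.sort()
--     range = [free[0]]
--
--     # Merge overlapping ranges
--     for r in free[1:]:
--         if r[0] > range[-1][1]: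
--             range.append(r)
--         else:
--             range[-1] = (range[-1][0], max([range[-1][1], r[1]]))
--
--     confirmed = 0
--
--     # Count the number of confirmed points
--     for r in range:
--         confirmed += (r[1] - r[0])
--
--     return str(confirmed)
-- ===== SOURCE B (Python) =====
-- def get_distance(b, s):
--     return abs(b[0] - s[0]) + abs(b[1] - s[1])
--
-- def part1(inputs):
--     target_y = 2000000
--     events = []
--     for sensor, beacon in inputs:
--         reach = get_distance(sensor, beacon) - abs(sensor[1] - target_y)
--         if reach >= 0:
--             events.append((sensor[0] - reach, 1))
--             events.append((sensor[0] + reach, -1))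
--     events.sort()
--     total = 0
--     count = 0
--     prev = events[0][0]
--     for x, delta in events:
--         if count > 0:
--             total += x - prev
--         count += delta
--         prev = x
--     return str(total)
-- ===== Notes on version B (the rewrite author's own statement) =====
-- stated objective: alternative
-- what changed: B replaces A's sort-intervals-then-merge-then-sum pipeline by a boundary-event sweep: it emits (left,+1)/(right,-1) events per covering sensor, sorts the events, and accumulates x-prev into the total whenever the running open-interval counter is positive.
import Mathlib
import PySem

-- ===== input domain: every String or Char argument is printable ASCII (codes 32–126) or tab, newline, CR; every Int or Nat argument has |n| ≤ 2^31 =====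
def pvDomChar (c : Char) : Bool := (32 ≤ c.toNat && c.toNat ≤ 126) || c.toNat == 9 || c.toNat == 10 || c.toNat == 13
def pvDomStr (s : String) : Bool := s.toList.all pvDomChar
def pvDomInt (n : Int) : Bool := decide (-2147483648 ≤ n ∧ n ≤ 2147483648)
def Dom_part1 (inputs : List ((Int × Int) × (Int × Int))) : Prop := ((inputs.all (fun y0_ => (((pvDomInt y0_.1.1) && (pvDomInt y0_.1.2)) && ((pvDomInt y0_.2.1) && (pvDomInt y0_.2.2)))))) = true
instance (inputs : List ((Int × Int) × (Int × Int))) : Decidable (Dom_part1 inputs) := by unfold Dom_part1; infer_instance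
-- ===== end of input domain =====

-- B replaces A's sort-intervals/merge/sum pipeline by a boundary-event sweep
-- ((l,+1)/(r,-1) events, sorted, coverage counter); objective: alternative algorithm.

-- ===== PORT A =====
def get_distance (b s : Int × Int) : Int := |b.1 - s.1| + |b.2 - s.2|

-- one iteration of A's "Merge overlapping ranges" loop (range[-1] read/write via getLast?/dropLast)
def mergeStep (rs : List (Int × Int)) (r : Int × Int) : List (Int × Int) :=
  match rs.getLast? with
  | none => rs ++ [r]   -- unreachable: the accumulator starts nonempty (totalization guard only)
  | some last =>
    if r.1 > last.2 then rs ++ [r]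
    else rs.dropLast ++ [(last.1, max last.2 r.2)]

def part1 (inputs : List ((Int × Int) × (Int × Int))) : String :=
  let targetY : Int := 2000000
  let free := inputs.foldl (fun acc sb =>
      let distance := get_distance sb.1 sb.2
      let dy := |sb.1.2 - targetY|
      if dy ≤ distance then
        let dx := distance - dy
        acc ++ [(sb.1.1 - dx, sb.1.1 + dx)]
      else acc) []
  let freeS := PySem.List.sorted2 free (fun p => p.1) (fun p => p.2)   -- free.sort(): tuples lexicographically
  match freeS with
  | [] => ""   -- Python raises IndexError here (free[0]); excluded by Pre_part1
  | f0 :: rest =>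
    let ranges := rest.foldl mergeStep [f0]
    let confirmed := ranges.foldl (fun c r => c + (r.2 - r.1)) 0
    PySem.Int.toStr confirmed

-- ===== PORT B =====
-- one iteration of B's sweep loop: state (total, count, prev), event (x, delta)
def sweepStep (st : Int × Int × Int) (e : Int × Int) : Int × Int × Int :=
  ((if 0 < st.2.1 then st.1 + (e.1 - st.2.2) else st.1), st.2.1 + e.2, e.1)

def part1_alt (inputs : List ((Int × Int) × (Int × Int))) : String :=
  let targetY : Int := 2000000
  let events := inputs.foldl (fun acc sb =>
      let reach := get_distance sb.1 sb.2 - |sb.1.2 - targetY|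
      if 0 ≤ reach then acc ++ [(sb.1.1 - reach, 1), (sb.1.1 + reach, -1)]
      else acc) []
  let eventsS := PySem.List.sorted2 events (fun e => e.1) (fun e => e.2)   -- events.sort(): tuples lexicographically
  match eventsS with
  | [] => ""   -- Python raises IndexError here (events[0]); excluded by Pre_part1
  | e0 :: _ =>
    let st := eventsS.foldl sweepStep (0, 0, e0.1)
    PySem.Int.toStr st.1

-- ===== PRECONDITION & SPEC =====
-- Pre_ excludes exactly the inputs where no sensor's range reaches row 2000000:
-- there both Pythons raise IndexError (A on free[0], B on events[0]).
def Pre_part1 (inputs : List ((Int × Int) × (Int × Int))) : Prop :=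
  ∃ sb ∈ inputs, |sb.1.2 - 2000000| ≤ |sb.2.1 - sb.1.1| + |sb.2.2 - sb.1.2|
instance (inputs : List ((Int × Int) × (Int × Int))) : Decidable (Pre_part1 inputs) := by
  unfold Pre_part1; infer_instance

def pvWitness_part1 : (List ((Int × Int) × (Int × Int))) := [((0, 2000000), (3, 2000001))]

def Spec_part1 (inputs : List ((Int × Int) × (Int × Int))) (out : String) : Prop := out = part1_alt inputs
instance (inputs : List ((Int × Int) × (Int × Int))) (out : String) : Decidable (Spec_part1 inputs out) := by unfold Spec_part1; infer_instance

-- ===== CLAIM (what is proved, stated in full; the proofs are below) =====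
def Claim_equal_part1 : Prop := ∀ (inputs : List ((Int × Int) × (Int × Int))), Dom_part1 inputs → Pre_part1 inputs → Spec_part1 inputs (part1 inputs)

-- ===== LEMMAS AND PROOFS =====

-- the spans covered on the target row, in input order (shared normal form of both ports' loops)
def spansOf (inputs : List ((Int × Int) × (Int × Int))) : List (Int × Int) :=
  ((inputs.map (fun sb => (sb.1.1, get_distance sb.1 sb.2 - |sb.1.2 - (2000000 : Int)|))).filter
      (fun xk => decide (0 ≤ xk.2))).map (fun xk => (xk.1 - xk.2, xk.1 + xk.2))

-- the finite set of integer cells x with some span l ≤ x < r (the half-open union)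
def covSet (S : List (Int × Int)) : Finset Int :=
  S.foldr (fun p acc => (PySem.List.pyRange p.1 p.2 1).toFinset ∪ acc) ∅

-- coverage count at x read off an event list
def cnt (E : List (Int × Int)) (x : Int) : Int :=
  (E.map (fun e => if e.1 ≤ x then e.2 else 0)).sum

-- running-max scan used only as the bridge between A's merge fold and the cell count
def scanStep (acc : Int × Int) (lr : Int × Int) : Int × Int :=
  (acc.1 + max 0 (lr.2 - max lr.1 acc.2), max acc.2 lr.2)

-- A's append loop builds exactly spansOf.
lemma free_eq_spans (inputs : List ((Int × Int) × (Int × Int))) (acc : List (Int × Int)) :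
    inputs.foldl (fun acc sb =>
      let distance := get_distance sb.1 sb.2
      let dy := |sb.1.2 - (2000000 : Int)|
      if dy ≤ distance then
        let dx := distance - dy
        acc ++ [(sb.1.1 - dx, sb.1.1 + dx)]
      else acc) acc
    = acc ++ spansOf inputs := by
  induction inputs generalizing acc with
  | nil => simp [spansOf]
  | cons sb t ih =>
    simp only [spansOf, List.foldl_cons, List.map_cons, List.filter_cons]
    by_cases h : |sb.1.2 - (2000000 : Int)| ≤ get_distance sb.1 sb.2
    · rw [if_pos h, ih]
      have h2 : (0 : Int) ≤ get_distance sb.1 sb.2 - |sb.1.2 - 2000000| := by omega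
      simp only [h2, decide_true]
      simp [spansOf]
    · rw [if_neg h, ih]
      have h2 : ¬ (0 : Int) ≤ get_distance sb.1 sb.2 - |sb.1.2 - 2000000| := by omega
      simp only [h2, decide_false]
      simp [spansOf]

-- B's append loop builds exactly the boundary events of spansOf.
lemma events_eq_spans (inputs : List ((Int × Int) × (Int × Int))) (acc : List (Int × Int)) :
    inputs.foldl (fun acc sb =>
      let reach := get_distance sb.1 sb.2 - |sb.1.2 - (2000000 : Int)|
      if 0 ≤ reach then acc ++ [(sb.1.1 - reach, 1), (sb.1.1 + reach, -1)]
      else acc) acc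
    = acc ++ (spansOf inputs).flatMap (fun p => [(p.1, (1 : Int)), (p.2, (-1 : Int))]) := by
  induction inputs generalizing acc with
  | nil => simp [spansOf]
  | cons sb t ih =>
    simp only [spansOf, List.foldl_cons, List.map_cons, List.filter_cons]
    by_cases h : (0 : Int) ≤ get_distance sb.1 sb.2 - |sb.1.2 - 2000000|
    · rw [if_pos h, ih]
      simp only [h, decide_true]
      simp [spansOf]
    · rw [if_neg h, ih]
      simp only [h, decide_false]
      simp [spansOf]

-- Every span is a nonempty interval (l ≤ r).
lemma spans_le (inputs : List ((Int × Int) × (Int × Int))) :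
    ∀ p ∈ spansOf inputs, p.1 ≤ p.2 := by
  intro p hp
  simp only [spansOf, List.mem_map, List.mem_filter] at hp
  obtain ⟨xk, ⟨_, hk⟩, rfl⟩ := hp
  simp only [decide_eq_true_eq] at hk
  simp only []
  omega

lemma pyRange_toFinset_eq_Ico (a b : Int) :
    (PySem.List.pyRange a b 1).toFinset = Finset.Ico a b := by
  apply Finset.ext
  intro x
  simp [List.mem_toFinset, PySem.List.mem_pyRange_one, Finset.mem_Ico]

lemma covSet_cons (p : Int × Int) (t : List (Int × Int)) :
    covSet (p :: t) = Finset.Ico p.1 p.2 ∪ covSet t := by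
  rw [covSet, List.foldr_cons, pyRange_toFinset_eq_Ico]
  rfl

lemma mem_covSet (S : List (Int × Int)) (x : Int) :
    x ∈ covSet S ↔ ∃ p ∈ S, p.1 ≤ x ∧ x < p.2 := by
  induction S with
  | nil => simp [covSet]
  | cons p t ih => rw [covSet_cons]; simp [Finset.mem_union, ih]

lemma covSet_perm {S T : List (Int × Int)} (h : S.Perm T) : covSet S = covSet T := by
  apply Finset.ext
  intro x
  rw [mem_covSet, mem_covSet]
  constructor
  · rintro ⟨p, hp, h2⟩; exact ⟨p, h.mem_iff.mp hp, h2⟩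
  · rintro ⟨p, hp, h2⟩; exact ⟨p, h.mem_iff.mpr hp, h2⟩

lemma cnt_perm {E F : List (Int × Int)} (h : E.Perm F) (x : Int) : cnt E x = cnt F x :=
  List.Perm.sum_eq (h.map _)

lemma cnt_flatMap (S : List (Int × Int)) (x : Int) :
    cnt (S.flatMap (fun p => [(p.1, (1 : Int)), (p.2, (-1 : Int))])) x
      = (S.map (fun p => (if p.1 ≤ x then (1 : Int) else 0) + (if p.2 ≤ x then (-1 : Int) else 0))).sum := by
  induction S with
  | nil => simp [cnt]
  | cons p t ih =>
    simp only [List.flatMap_cons, cnt, List.map_append, List.sum_append, List.map_cons,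
      List.sum_cons, List.map_nil, List.sum_nil] at ih ⊢
    omega

-- positivity of the event count at x is membership in the half-open union
lemma cnt_pos_iff (S : List (Int × Int)) (hle : ∀ p ∈ S, p.1 ≤ p.2) (x : Int) :
    (0 < cnt (S.flatMap (fun p => [(p.1, (1 : Int)), (p.2, (-1 : Int))])) x) ↔ x ∈ covSet S := by
  rw [cnt_flatMap, mem_covSet]
  have hmap : (S.map (fun p => (if p.1 ≤ x then (1 : Int) else 0) + (if p.2 ≤ x then (-1 : Int) else 0)))
      = (S.map (fun p => if (decide (p.1 ≤ x) && decide (x < p.2)) = true then (1 : Int) else 0)) := by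
    apply List.map_congr_left
    intro p hp
    have := hle p hp
    by_cases h1 : p.1 ≤ x <;> by_cases h2 : x < p.2 <;>
      simp [h1, h2] <;> omega
  rw [hmap, PySem.List.sum_map_ite_one_zero]
  rw [show ((0 : Int) < (List.countP (fun p => decide (p.1 ≤ x) && decide (x < p.2)) S : Int)) ↔
        0 < List.countP (fun p => decide (p.1 ≤ x) && decide (x < p.2)) S by exact_mod_cast Iff.rfl]
  rw [List.countP_pos_iff]
  constructor
  · rintro ⟨p, hp, h⟩
    simp only [Bool.and_eq_true, decide_eq_true_eq] at h
    exact ⟨p, hp, h⟩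
  · rintro ⟨p, hp, h⟩
    exact ⟨p, hp, by simp [h.1, h.2]⟩

-- ---- ordering facts about sorted2 with integer keys (lexicographic) ----

def btLex (a b : Int × Int) : Bool :=
  decide (a.1 < b.1) || (!decide (b.1 < a.1) && decide (a.2 < b.2))

def RLex (a b : Int × Int) : Prop := a.1 < b.1 ∨ (a.1 = b.1 ∧ a.2 ≤ b.2)

lemma sorted2_eq_foldl (xs : List (Int × Int)) :
    PySem.List.sorted2 xs (fun p => p.1) (fun p => p.2) false
      = xs.foldl (fun acc x => PySem.List.insertBy btLex x acc) [] := rfl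

lemma insertBy_pairwise (x : Int × Int) :
    ∀ (l : List (Int × Int)), l.Pairwise RLex → (PySem.List.insertBy btLex x l).Pairwise RLex := by
  intro l
  induction l with
  | nil => intro _; simp [PySem.List.insertBy]
  | cons y ys ih =>
    intro hp
    rw [List.pairwise_cons] at hp
    by_cases hb : btLex x y = true
    · have hRxy : RLex x y := by
        simp only [btLex, Bool.or_eq_true, Bool.and_eq_true, Bool.not_eq_true',
          decide_eq_true_eq, decide_eq_false_iff_not] at hb
        unfold RLex; omega
      have : PySem.List.insertBy btLex x (y :: ys) = x :: y :: ys := by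
        simp [PySem.List.insertBy, hb]
      rw [this, List.pairwise_cons]
      refine ⟨?_, by rw [List.pairwise_cons]; exact hp⟩
      intro z hz
      rcases List.mem_cons.mp hz with rfl | hz
      · exact hRxy
      · have hyz := hp.1 z hz
        unfold RLex at hRxy hyz ⊢; omega
    · have : PySem.List.insertBy btLex x (y :: ys) = y :: PySem.List.insertBy btLex x ys := by
        simp [PySem.List.insertBy, hb]
      rw [this, List.pairwise_cons]
      refine ⟨?_, ih hp.2⟩
      intro z hz
      rcases (PySem.List.mem_insertBy btLex x z ys).mp hz with rfl | hz
      · simp [btLex] at hb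
        unfold RLex; omega
      · exact hp.1 z hz
  
lemma sorted2_pairwise_lex (xs : List (Int × Int)) :
    (PySem.List.sorted2 xs (fun p => p.1) (fun p => p.2) false).Pairwise RLex := by
  rw [sorted2_eq_foldl]
  have : ∀ (l : List (Int × Int)) (acc : List (Int × Int)), acc.Pairwise RLex →
      (l.foldl (fun acc x => PySem.List.insertBy btLex x acc) acc).Pairwise RLex := by
    intro l
    induction l with
    | nil => intro acc h; simpa using h
    | cons x t ih =>
      intro acc h
      exact ih _ (insertBy_pairwise x acc h)
  exact this xs [] (by simp)

-- ---- A's side: merge fold = running-max scan (no order assumption needed) ----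

-- Core invariant: A's merge fold followed by summing widths equals the scalar scan,
-- provided the accumulator list is nonempty, `reach` is its last right end and
-- `total` its summed width, and every remaining span satisfies l ≤ r.
lemma merge_scan (rest : List (Int × Int)) :
    ∀ (rs : List (Int × Int)) (total reach s : Int),
      rs.getLast? = some (s, reach) →
      total = (rs.map (fun r => r.2 - r.1)).sum →
      (∀ p ∈ rest, p.1 ≤ p.2) →
      ((rest.foldl mergeStep rs).map (fun r => r.2 - r.1)).sum
        = (rest.foldl scanStep (total, reach)).1 := by
  induction rest with
  | nil =>
    intro rs total reach s hlast htotal _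
    simpa using htotal.symm
  | cons lr t ih =>
    intro rs total reach s hlast htotal hle
    obtain ⟨pre, rfl⟩ := List.getLast?_eq_some_iff.mp hlast
    have hlr : lr.1 ≤ lr.2 := hle lr (by simp)
    simp only [List.foldl_cons]
    by_cases hgap : lr.1 > reach
    · -- new disjoint range appended
      have hm : mergeStep (pre ++ [(s, reach)]) lr = (pre ++ [(s, reach)]) ++ [lr] := by
        simp [mergeStep, hgap]
      have h1 : max lr.1 reach = lr.1 := by omega
      have h2 : max 0 (lr.2 - lr.1) = lr.2 - lr.1 := by omega
      have h3 : max reach lr.2 = lr.2 := by omega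
      have hs : scanStep (total, reach) lr = (total + (lr.2 - lr.1), lr.2) := by
        simp [scanStep, h1, h2, h3]
      rw [hm, hs]
      refine ih _ _ _ lr.1 ?_ ?_ (fun p hp => hle p (by simp [hp]))
      · simp
      · subst htotal; simp; ring
    · -- merged into the last range
      have hm : mergeStep (pre ++ [(s, reach)]) lr = pre ++ [(s, max reach lr.2)] := by
        simp [mergeStep, hgap]
      have h1 : max lr.1 reach = reach := by omega
      have hs : scanStep (total, reach) lr = (total + max 0 (lr.2 - reach), max reach lr.2) := by
        simp [scanStep, h1]
      rw [hm, hs]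
      refine ih _ _ _ s ?_ ?_ (fun p hp => hle p (by simp [hp]))
      · simp
      · subst htotal
        simp only [List.map_append, List.sum_append, List.map_cons, List.map_nil,
          List.sum_cons, List.sum_nil]
        omega

-- the running-max scan over fst-sorted spans counts exactly the cells of the half-open union
lemma scan_card (S : List (Int × Int)) :
    ∀ (A : Finset Int) (lcur reach total : Int),
      (∀ p ∈ S, lcur ≤ p.1 ∧ p.1 ≤ p.2) →
      S.Pairwise (fun a b => a.1 ≤ b.1) →
      (∀ x ∈ A, x < reach) →
      (∀ x, lcur ≤ x → x < reach → x ∈ A) →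
      total = (A.card : Int) →
      (S.foldl scanStep (total, reach)).1 = (((A ∪ covSet S).card : Nat) : Int) := by
  induction S with
  | nil =>
    intro A lcur reach total _ _ _ _ htotal
    simpa [covSet] using htotal
  | cons lr rest ih =>
    intro A lcur reach total hsp hpw hAlt hAin htotal
    obtain ⟨l, r⟩ := lr
    have hl : lcur ≤ l ∧ l ≤ r := hsp (l, r) (by simp)
    rw [List.pairwise_cons] at hpw
    simp only [List.foldl_cons]
    have hstep : scanStep (total, reach) (l, r) = (total + max 0 (r - max l reach), max reach r) := rfl
    rw [hstep]
    have hU : A ∪ Finset.Ico l r = A ∪ Finset.Ico (max l reach) r := by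
      apply Finset.ext
      intro x
      simp only [Finset.mem_union, Finset.mem_Ico]
      constructor
      · rintro (hx | ⟨h1, h2⟩)
        · exact Or.inl hx
        · by_cases hx : max l reach ≤ x
          · exact Or.inr ⟨hx, h2⟩
          · exact Or.inl (hAin x (by omega) (by omega))
      · rintro (hx | ⟨h1, h2⟩)
        · exact Or.inl hx
        · exact Or.inr ⟨by omega, h2⟩
    have hdisj : Disjoint A (Finset.Ico (max l reach) r) := by
      rw [Finset.disjoint_right]
      intro x hx hxA
      have := hAlt x hxA
      simp only [Finset.mem_Ico] at hx
      omega
    have hcard : total + max 0 (r - max l reach) = (((A ∪ Finset.Ico l r).card : Nat) : Int) := by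
      rw [hU, Finset.card_union_of_disjoint hdisj, Int.card_Ico]
      push_cast [Int.toNat_eq_max]
      omega
    have := ih (A ∪ Finset.Ico l r) l (max reach r) (total + max 0 (r - max l reach))
      (fun p hp => ⟨hpw.1 p hp, (hsp p (by simp [hp])).2⟩) hpw.2
      (by
        intro x hx
        rcases Finset.mem_union.mp hx with hx | hx
        · have := hAlt x hx; omega
        · simp only [Finset.mem_Ico] at hx; omega)
      (by
        intro x hx1 hx2
        by_cases hxr : x < reach
        · exact Finset.mem_union_left _ (hAin x (by omega) hxr)
        · exact Finset.mem_union_right _ (Finset.mem_Ico.mpr ⟨hx1, by omega⟩))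
      hcard
    rw [this, covSet_cons, ← Finset.union_assoc]

-- the event sweep over fst-sorted events counts the cells where the running count is positive
lemma sweep_card (E : List (Int × Int)) :
    ∀ (total count prev B : Int),
      (∀ e ∈ E, prev ≤ e.1 ∧ e.1 ≤ B) →
      E.Pairwise (fun a b => a.1 ≤ b.1) →
      count + cnt E B ≤ 0 →
      prev ≤ B →
      (E.foldl sweepStep (total, count, prev)).1
        = total + ((((Finset.Ico prev B).filter (fun x => 0 < count + cnt E x)).card : Nat) : Int) := by
  induction E with
  | nil =>
    intro total count prev B _ _ hbal _
    have : ∀ x ∈ Finset.Ico prev B, ¬ (0 < count + cnt [] x) := by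
      intro x _
      simp only [cnt, List.map_nil, List.sum_nil] at hbal ⊢
      omega
    rw [Finset.filter_false_of_mem this]
    simp
  | cons e rest ih =>
    intro total count prev B hbound hpw hbal hprevB
    obtain ⟨x, d⟩ := e
    have hx : prev ≤ x ∧ x ≤ B := hbound (x, d) (by simp)
    rw [List.pairwise_cons] at hpw
    simp only [List.foldl_cons]
    have hstep : sweepStep (total, count, prev) (x, d)
        = ((if 0 < count then total + (x - prev) else total), count + d, x) := rfl
    rw [hstep]
    have hcntE : ∀ y : Int, x ≤ y → cnt ((x, d) :: rest) y = d + cnt rest y := by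
      intro y hy
      simp [cnt, hy]
    have hrest0 : ∀ y : Int, y < x → cnt rest y = 0 := by
      intro y hy
      apply List.sum_eq_zero
      intro z hz
      rw [List.mem_map] at hz
      obtain ⟨e, he, rfl⟩ := hz
      have := hpw.1 e he
      have : ¬ (e.1 ≤ y) := by omega
      simp [this]
    have hIH := ih (if 0 < count then total + (x - prev) else total) (count + d) x B
      (fun e he => ⟨hpw.1 e he, (hbound e (by simp [he])).2⟩) hpw.2
      (by rw [hcntE B hx.2] at hbal; omega) hx.2
    rw [hIH]
    -- split [prev, B) at x
    have hsplit : Finset.Ico prev B = Finset.Ico prev x ∪ Finset.Ico x B :=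
      (Finset.Ico_union_Ico_eq_Ico hx.1 hx.2).symm
    have hdisj : Disjoint (Finset.Ico prev x) (Finset.Ico x B) := by
      rw [Finset.disjoint_right]
      intro y hy1 hy2
      simp only [Finset.mem_Ico] at hy1 hy2
      omega
    rw [hsplit, Finset.filter_union, Finset.card_union_of_disjoint (Finset.disjoint_filter_filter hdisj)]
    -- left part: condition is just 0 < count
    have hleft : (Finset.Ico prev x).filter (fun y => 0 < count + cnt ((x, d) :: rest) y)
        = if 0 < count then Finset.Ico prev x else ∅ := by
      split_ifs with hc
      · apply Finset.filter_true_of_mem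
        intro y hy
        simp only [Finset.mem_Ico] at hy
        have h1 : cnt ((x, d) :: rest) y = 0 := by
          have : ¬ (x ≤ y) := by omega
          simp [cnt, this]
          have := hrest0 y (by omega)
          simpa [cnt] using this
        omega
      · apply Finset.filter_false_of_mem
        intro y hy
        simp only [Finset.mem_Ico] at hy
        have h1 : cnt ((x, d) :: rest) y = 0 := by
          have : ¬ (x ≤ y) := by omega
          simp [cnt, this]
          have := hrest0 y (by omega)
          simpa [cnt] using this
        omega
    -- right part: condition matches the IH's predicate
    have hright : (Finset.Ico x B).filter (fun y => 0 < count + cnt ((x, d) :: rest) y)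
        = (Finset.Ico x B).filter (fun y => 0 < count + d + cnt rest y) := by
      apply Finset.filter_congr
      intro y hy
      simp only [Finset.mem_Ico] at hy
      rw [hcntE y hy.1]
      constructor <;> intro h <;> omega
    rw [hleft, hright]
    split_ifs with hc
    · rw [Int.card_Ico]
      push_cast [Int.toNat_eq_max]
      omega
    · simp

-- ===== VERDICT (by name: the statement is the Claim_ definition above) =====
theorem part1_spec : Claim_equal_part1 := by
  intro inputs _ hpre
  unfold Spec_part1 part1 part1_alt
  simp only []
  rw [free_eq_spans inputs [], events_eq_spans inputs []]
  simp only [List.nil_append]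
  have hUle := spans_le inputs
  -- Pre_ gives a covering sensor, hence a span
  have hUne : spansOf inputs ≠ [] := by
    obtain ⟨sb, hsb, hle⟩ := hpre
    intro hnil
    have hmem : (sb.1.1 - (get_distance sb.1 sb.2 - |sb.1.2 - (2000000 : Int)|),
        sb.1.1 + (get_distance sb.1 sb.2 - |sb.1.2 - (2000000 : Int)|)) ∈ spansOf inputs := by
      simp only [spansOf, List.mem_map, List.mem_filter]
      refine ⟨(sb.1.1, get_distance sb.1 sb.2 - |sb.1.2 - (2000000 : Int)|),
        ⟨⟨sb, hsb, rfl⟩, ?_⟩, rfl⟩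
      simp only [decide_eq_true_eq, get_distance]
      rw [abs_sub_comm sb.2.1 sb.1.1, abs_sub_comm sb.2.2 sb.1.2] at hle
      omega
    rw [hnil] at hmem
    exact absurd hmem (List.not_mem_nil)
  -- A side
  have hSperm := PySem.List.sorted2_perm (spansOf inputs) (fun p => p.1) (fun p => p.2) false
  have hSpw := sorted2_pairwise_lex (spansOf inputs)
  cases hS : PySem.List.sorted2 (spansOf inputs) (fun p => p.1) (fun p => p.2) false with
  | nil =>
    rw [hS] at hSperm
    exact absurd (List.nil_perm.mp hSperm) hUne
  | cons f0 rest =>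
    obtain ⟨l0, r0⟩ := f0
    rw [hS] at hSperm hSpw
    have hmemU : ∀ p ∈ (l0, r0) :: rest, p ∈ spansOf inputs := fun p hp => hSperm.mem_iff.mp hp
    have hrest_le : ∀ p ∈ rest, p.1 ≤ p.2 := fun p hp => hUle p (hmemU p (by simp [hp]))
    have hl0r0 : l0 ≤ r0 := hUle (l0, r0) (hmemU (l0, r0) (by simp))
    have hpwfst : ((l0, r0) :: rest).Pairwise (fun a b : Int × Int => a.1 ≤ b.1) :=
      hSpw.imp (fun h => by unfold RLex at h; omega)
    rw [List.pairwise_cons] at hpwfst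
    have hA1 := merge_scan rest [(l0, r0)] (r0 - l0) r0 l0 (by simp) (by simp) hrest_le
    have hA2 := scan_card rest (Finset.Ico l0 r0) l0 r0 (r0 - l0)
      (fun p hp => ⟨hpwfst.1 p hp, hrest_le p hp⟩) hpwfst.2
      (by intro x hx; exact (Finset.mem_Ico.mp hx).2)
      (by intro x h1 h2; exact Finset.mem_Ico.mpr ⟨h1, h2⟩)
      (by rw [Int.card_Ico, Int.toNat_of_nonneg (by omega)])
    have hfa := PySem.List.foldl_add (fun r : Int × Int => r.2 - r.1)
      (l := rest.foldl mergeStep [(l0, r0)]) (a := (0 : Int))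
    simp only [] at hfa
    have hAval : (rest.foldl mergeStep [(l0, r0)]).foldl (fun c r => c + (r.2 - r.1)) 0
        = ((covSet (spansOf inputs)).card : Int) := by
      rw [hfa, zero_add, hA1, hA2, ← covSet_cons (l0, r0) rest, covSet_perm hSperm]
    -- B side
    have hEperm := PySem.List.sorted2_perm
      ((spansOf inputs).flatMap (fun p => [(p.1, (1 : Int)), (p.2, (-1 : Int))]))
      (fun e => e.1) (fun e => e.2) false
    have hEpw := sorted2_pairwise_lex
      ((spansOf inputs).flatMap (fun p => [(p.1, (1 : Int)), (p.2, (-1 : Int))]))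
    cases hE : PySem.List.sorted2
        ((spansOf inputs).flatMap (fun p => [(p.1, (1 : Int)), (p.2, (-1 : Int))]))
        (fun e => e.1) (fun e => e.2) false with
    | nil =>
      rw [hE] at hEperm
      have := List.nil_perm.mp hEperm
      cases hU : spansOf inputs with
      | nil => exact absurd hU hUne
      | cons p t => rw [hU] at this; simp at this
    | cons e0 restE =>
      obtain ⟨x0, d0⟩ := e0
      rw [hE] at hEperm hEpw
      have hmemEv : ∀ e ∈ (x0, d0) :: restE,
          e ∈ (spansOf inputs).flatMap (fun p => [(p.1, (1 : Int)), (p.2, (-1 : Int))]) :=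
        fun e he => hEperm.mem_iff.mp he
      have hEpwfst : ((x0, d0) :: restE).Pairwise (fun a b : Int × Int => a.1 ≤ b.1) :=
        hEpw.imp (fun h => by unfold RLex at h; omega)
      rw [List.pairwise_cons] at hEpwfst
      have hmax := PySem.List.le_foldl_max_int restE (fun e => e.1) x0
      -- the sweep bound: one past the largest event coordinate
      have hcoord : ∀ e ∈ (x0, d0) :: restE,
          x0 ≤ e.1 ∧ e.1 ≤ restE.foldl (fun acc e => max acc e.1) x0 + 1 := by
        intro e he
        rcases List.mem_cons.mp he with rfl | he
        · exact ⟨le_refl _, by have := hmax.1; omega⟩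
        · exact ⟨hEpwfst.1 e he, by have := hmax.2 e he; omega⟩
      have hcoordEv : ∀ e ∈ (spansOf inputs).flatMap (fun p => [(p.1, (1 : Int)), (p.2, (-1 : Int))]),
          x0 ≤ e.1 ∧ e.1 ≤ restE.foldl (fun acc e => max acc e.1) x0 + 1 :=
        fun e he => hcoord e (hEperm.mem_iff.mpr he)
      have hx0B : x0 ≤ restE.foldl (fun acc e => max acc e.1) x0 + 1 := by
        have := hmax.1; omega
      -- total of all deltas is 0
      have hcntEv0 : cnt ((spansOf inputs).flatMap (fun p => [(p.1, (1 : Int)), (p.2, (-1 : Int))]))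
          (restE.foldl (fun acc e => max acc e.1) x0 + 1) = 0 := by
        rw [cnt_flatMap]
        apply List.sum_eq_zero
        intro z hz
        rw [List.mem_map] at hz
        obtain ⟨p, hp, rfl⟩ := hz
        have h1 := (hcoordEv (p.1, 1) (List.mem_flatMap.mpr ⟨p, hp, by simp⟩)).2
        have h2 := (hcoordEv (p.2, -1) (List.mem_flatMap.mpr ⟨p, hp, by simp⟩)).2
        simp only [] at h1 h2
        rw [if_pos h1, if_pos h2]
        ring
      have hbal : d0 + cnt restE (restE.foldl (fun acc e => max acc e.1) x0 + 1) ≤ 0 := by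
        have hcons : cnt ((x0, d0) :: restE) (restE.foldl (fun acc e => max acc e.1) x0 + 1)
            = d0 + cnt restE (restE.foldl (fun acc e => max acc e.1) x0 + 1) := by
          simp [cnt, hx0B]
        rw [← hcons, cnt_perm hEperm, hcntEv0]
      have hsw := sweep_card restE 0 d0 x0 (restE.foldl (fun acc e => max acc e.1) x0 + 1)
        (fun e he => ⟨hEpwfst.1 e he, (hcoord e (by simp [he])).2⟩) hEpwfst.2 hbal hx0B
      -- the filtered cells are exactly the covered cells
      have hkey : ∀ y : Int, x0 ≤ y → d0 + cnt restE y
          = cnt ((spansOf inputs).flatMap (fun p => [(p.1, (1 : Int)), (p.2, (-1 : Int))])) y := by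
        intro y hy
        rw [← cnt_perm hEperm y]
        simp [cnt, hy]
      have hset : (Finset.Ico x0 (restE.foldl (fun acc e => max acc e.1) x0 + 1)).filter
            (fun y => 0 < d0 + cnt restE y) = covSet (spansOf inputs) := by
        apply Finset.ext
        intro y
        rw [Finset.mem_filter, Finset.mem_Ico]
        constructor
        · rintro ⟨⟨h1, h2⟩, h3⟩
          rw [hkey y h1] at h3
          exact (cnt_pos_iff (spansOf inputs) hUle y).mp h3
        · intro hy
          obtain ⟨p, hp, hc1, hc2⟩ := (mem_covSet (spansOf inputs) y).mp hy
          have h1 := hcoordEv (p.1, 1) (List.mem_flatMap.mpr ⟨p, hp, by simp⟩)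
          have h2 := hcoordEv (p.2, -1) (List.mem_flatMap.mpr ⟨p, hp, by simp⟩)
          simp only [] at h1 h2
          have hx0y : x0 ≤ y := le_trans h1.1 hc1
          refine ⟨⟨hx0y, by omega⟩, ?_⟩
          rw [hkey y hx0y]
          exact (cnt_pos_iff (spansOf inputs) hUle y).mpr hy
      -- assemble both sides
      have hstep0 : sweepStep (0, 0, x0) (x0, d0) = (0, d0, x0) := by
        simp [sweepStep]
      show PySem.Int.toStr ((rest.foldl mergeStep [(l0, r0)]).foldl (fun c r => c + (r.2 - r.1)) 0)
          = PySem.Int.toStr (((x0, d0) :: restE).foldl sweepStep (0, 0, (x0, d0).1)).1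
      rw [hAval, List.foldl_cons, hstep0, hsw, hset]
      norm_num
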